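-- pv_equiv track=rewrite | github.com/wieslander/aoc-2024 | src/aoc/days/09.py | compact_filesystem
-- ===== SOURCE A (Python) =====
-- def compact_filesystem(disk: list[int | None]):
--     result: list[int] = []
--     left = 0
--     right = len(disk) - 1
--
--     while left <= right:
--         file_id = disk[left]
--         if file_id is not None:
--             result.append(file_id)
--             left += 1
--             continue
--         else:
--             file_id = disk[right]
--             if file_id is not None:
--                 result.append(file_id)
--                 left += 1
--             right -= 1
--
--     return result
-- ===== SOURCE B (Python) =====
-- def compact_filesystem(disk: list[int | None]):
--     # Staged scatter construction: the result occupies exactly the first N slots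
--     # (N = number of values), so build that prefix directly and overwrite its gap
--     # positions, by index, with the tail values that must move (reversed order).
--     vals = [x for x in disk if x is not None]
--     n = len(vals)
--     head = disk[:n]
--     out = [x if x is not None else 0 for x in head]  # 0 = placeholder, every gap is overwritten
--     gaps = [i for i, x in enumerate(head) if x is None]
--     movers = vals[n - len(gaps):]
--     for i, v in zip(gaps, reversed(movers)):
--         out[i] = v
--     return out
-- ===== Notes on version B (the rewrite author's own statement) =====
-- stated objective: alternative
-- what changed: Replaces A's sequential two-pointer march with a staged scatter construction: B observes the result occupies exactly the first N slots (N = number of values), builds that prefix with placeholders, collects the gap indices, and overwrites them by random-access index assignment with the reversed tail values that must move.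
import Mathlib
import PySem

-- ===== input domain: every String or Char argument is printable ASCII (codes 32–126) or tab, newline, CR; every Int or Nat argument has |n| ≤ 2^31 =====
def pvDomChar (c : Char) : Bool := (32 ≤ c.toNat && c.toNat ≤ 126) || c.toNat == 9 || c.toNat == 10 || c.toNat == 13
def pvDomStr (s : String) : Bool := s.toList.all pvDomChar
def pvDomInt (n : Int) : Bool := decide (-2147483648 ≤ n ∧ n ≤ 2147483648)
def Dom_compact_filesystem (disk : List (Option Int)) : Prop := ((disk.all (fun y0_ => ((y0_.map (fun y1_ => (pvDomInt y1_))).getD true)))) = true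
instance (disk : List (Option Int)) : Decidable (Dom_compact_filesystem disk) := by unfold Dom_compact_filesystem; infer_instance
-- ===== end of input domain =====

-- B replaces A's two-pointer march by a staged scatter: build the length-N prefix,
-- collect its gap indices, and overwrite them with the reversed moved tail values
-- (alternative decomposition, same cost).

-- ===== PORT A =====
-- the while-loop of A: state (left, right, result); pyGetD totalises the (in-range) indexings
def pvLoopA (disk : List (Option Int)) (left right : Int) (result : List Int) : List Int :=
  if left ≤ right then
    match PySem.List.pyGetD disk left none with
    | some fid => pvLoopA disk (left + 1) right (result ++ [fid])
    | none =>
      match PySem.List.pyGetD disk right none with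
      | some fid => pvLoopA disk (left + 1) (right - 1) (result ++ [fid])
      | none => pvLoopA disk left (right - 1) result
  else result
termination_by (right + 1 - left).toNat
decreasing_by all_goals omega

def compact_filesystem (disk : List (Option Int)) : List Int :=
  pvLoopA disk 0 (PySem.List.len disk - 1) []

-- ===== PORT B =====
-- port of Source B's comprehension `[i for i, x in enumerate(head) if x is None]`
def pvGaps : List (Option Int) → Nat → List Nat
  | [], _ => []
  | none :: t, i => i :: pvGaps t (i + 1)
  | some _ :: t, i => pvGaps t (i + 1)

def compact_filesystem_alt (disk : List (Option Int)) : List Int :=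
  let vals := disk.filterMap id
  let n := vals.length
  let head := disk.take n
  let out := head.map (fun x => match x with | some v => v | none => 0)
  let gaps := pvGaps head 0
  let movers := vals.drop (n - gaps.length)
  (gaps.zip movers.reverse).foldl (fun o p => o.set p.1 p.2) out

-- ===== PRECONDITION & SPEC =====
def Spec_compact_filesystem (disk : List (Option Int)) (out : List Int) : Prop := out = compact_filesystem_alt disk
instance (disk : List (Option Int)) (out : List Int) : Decidable (Spec_compact_filesystem disk out) := by unfold Spec_compact_filesystem; infer_instance

-- ===== CLAIM (what is proved, stated in full; the proofs are below) =====
def Claim_equal_compact_filesystem : Prop := ∀ (disk : List (Option Int)), Dom_compact_filesystem disk → Spec_compact_filesystem disk (compact_filesystem disk)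

-- ===== LEMMAS AND PROOFS =====

-- `pvFill xs back`: xs with each None replaced by the next element of back (stops if back runs out)
def pvFill : List (Option Int) → List Int → List Int
  | [], _ => []
  | some v :: t, back => v :: pvFill t back
  | none :: t, b :: bs => b :: pvFill t bs
  | none :: _, [] => []

-- two-ended recursion mirroring A's pointer moves on the remaining segment
def pvGA : List (Option Int) → List Int
  | [] => []
  | some v :: t => v :: pvGA t
  | none :: t =>
    match _h : t.getLast? with
    | some (some w) => w :: pvGA t.dropLast
    | some none => pvGA (none :: t.dropLast)
    | none => []
termination_by s => s.length
decreasing_by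
  · simp
  · simp [List.length_dropLast]
  · have ht : t ≠ [] := by intro hnil; rw [hnil] at _h; simp at _h
    have := List.length_pos_iff.mpr ht
    simp [List.length_dropLast]; omega

lemma pvFill_prefix_append (u v : List (Option Int)) (B : List Int) :
    pvFill u B <+: pvFill (u ++ v) B := by
  induction u generalizing B with
  | nil => simp [pvFill]
  | cons x t ih =>
    cases x with
    | some a => simpa [pvFill] using ih B
    | none =>
      cases B with
      | nil => simp [pvFill]
      | cons b bs => simpa [pvFill] using ih bs

lemma pvFill_prefix_ext (u : List (Option Int)) (B e : List Int) :
    pvFill u B <+: pvFill u (B ++ e) := by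
  induction u generalizing B with
  | nil => simp [pvFill]
  | cons x t ih =>
    cases x with
    | some a => simpa [pvFill] using ih B
    | none =>
      cases B with
      | nil => simp [pvFill]
      | cons b bs => simpa [pvFill] using ih bs

lemma pvFill_length (u : List (Option Int)) (B : List Int) :
    min u.length B.length ≤ (pvFill u B).length := by
  induction u generalizing B with
  | nil => simp [pvFill]
  | cons x t ih =>
    cases x with
    | some a =>
      have := ih B
      simp [pvFill]; omega
    | none =>
      cases B with
      | nil => simp [pvFill]
      | cons b bs =>
        have := ih bs
        simp [pvFill]; omega

lemma pvTake_of_prefix {p q : List Int} (m : Nat) (h : p <+: q) (hm : m ≤ p.length) :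
    q.take m = p.take m := by
  obtain ⟨r, rfl⟩ := h
  rw [List.take_append_of_le_length hm]

lemma pvTake_fill_ext (t : List (Option Int)) (e : List Int) :
    (pvFill t (t.reduceOption.reverse ++ e)).take t.reduceOption.length
      = (pvFill t t.reduceOption.reverse).take t.reduceOption.length := by
  have hcnt := List.reduceOption_length_le t
  have hlen := pvFill_length t t.reduceOption.reverse
  exact pvTake_of_prefix _ (pvFill_prefix_ext t _ e) (by simp at hlen ⊢; omega)

lemma pvTake_fill_app (t v : List (Option Int)) :
    (pvFill (t ++ v) t.reduceOption.reverse).take t.reduceOption.length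
      = (pvFill t t.reduceOption.reverse).take t.reduceOption.length := by
  have hcnt := List.reduceOption_length_le t
  have hlen := pvFill_length t t.reduceOption.reverse
  exact pvTake_of_prefix _ (pvFill_prefix_append t v _) (by simp at hlen ⊢; omega)

-- the heart of the A side: the two-ended recursion = "fill gaps from the reversed value list, take the count"
lemma pvGA_spec (s : List (Option Int)) :
    pvGA s = (pvFill s s.reduceOption.reverse).take s.reduceOption.length := by
  generalize hn : s.length = n
  induction n using Nat.strong_induction_on generalizing s with
  | _ n ih =>
  subst hn
  match s with
  | [] => simp [pvGA, pvFill]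
  | some v :: t =>
    rw [pvGA]
    simp only [List.reduceOption_cons_of_some, List.reverse_cons, List.length_cons, pvFill]
    rw [List.take_succ_cons, pvTake_fill_ext t [v], ih t.length (by simp) t rfl]
  | none :: t =>
    rcases t.eq_nil_or_concat with rfl | ⟨t', x, rfl⟩
    · simp [pvGA, pvFill]
    · rw [pvGA]
      simp only [List.concat_eq_append]
      split
      next w' heq =>
        simp only [List.concat_eq_append] at heq
        rw [List.getLast?_concat] at heq
        obtain rfl : x = some w' := by simpa using heq
        have hdrop : (t' ++ [some w']).dropLast = t' := by simp
        rw [hdrop]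
        have hred : (none :: (t' ++ [some w'])).reduceOption = t'.reduceOption ++ [w'] := by
          simp [List.reduceOption_cons_of_none, List.reduceOption_append]
        rw [hred, List.reverse_append]
        simp only [List.reverse_cons, List.reverse_nil, List.nil_append, List.singleton_append,
          List.length_append, List.length_cons, List.length_nil, Nat.zero_add, pvFill]
        rw [List.take_succ_cons, pvTake_fill_app t' [some w'],
          ih t'.length (by simp) t' rfl]
      next heq =>
        simp only [List.concat_eq_append] at heq
        rw [List.getLast?_concat] at heq
        obtain rfl : x = none := by simpa using heq
        have hdrop : (t' ++ [none]).dropLast = t' := by simp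
        rw [hdrop]
        have hred : (none :: (t' ++ [(none : Option Int)])).reduceOption = t'.reduceOption := by
          simp [List.reduceOption_cons_of_none, List.reduceOption_append]
        have hred2 : (none :: t' : List (Option Int)).reduceOption = t'.reduceOption := by
          simp [List.reduceOption_cons_of_none]
        rw [hred, ih (t'.length + 1) (by simp) (none :: t') (by simp), hred2]
        rw [show (none :: (t' ++ [(none : Option Int)])) = (none :: t') ++ [none] from by simp]
        rw [show t'.reduceOption = ((none : Option Int) :: t').reduceOption from hred2.symm]
        exact (pvTake_fill_app (none :: t') [none]).symm
      next heq =>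
        simp only [List.concat_eq_append] at heq
        rw [List.getLast?_concat] at heq; simp at heq

-- small-step equations for pvGA (its `none` case is a dependent match)
lemma pvGA_cons_some (v : Int) (t : List (Option Int)) : pvGA (some v :: t) = v :: pvGA t := by
  rw [pvGA]

lemma pvGA_cons_none_some (t : List (Option Int)) (w : Int) (h : t.getLast? = some (some w)) :
    pvGA (none :: t) = w :: pvGA t.dropLast := by
  rw [pvGA]; split <;> simp_all

lemma pvGA_cons_none_none (t : List (Option Int)) (h : t.getLast? = some none) :
    pvGA (none :: t) = pvGA (none :: t.dropLast) := by
  rw [pvGA]; split <;> simp_all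

lemma pvGA_singleton_none : pvGA [none] = [] := by
  rw [pvGA]; split <;> simp_all

-- segment facts
lemma pvSeg_cons (xs : List (Option Int)) (j m : Nat) (hj : j < xs.length) (hm : 1 ≤ m) :
    (xs.drop j).take m = xs[j] :: (xs.drop (j + 1)).take (m - 1) := by
  obtain ⟨m', rfl⟩ : ∃ m', m = m' + 1 := ⟨m - 1, by omega⟩
  rw [List.drop_eq_getElem_cons hj, List.take_succ_cons, Nat.add_sub_cancel]

lemma pvSeg_getLast? (xs : List (Option Int)) (j m : Nat) (h1 : 1 ≤ m) (h2 : j + m ≤ xs.length) :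
    ((xs.drop j).take m).getLast? = xs[j + m - 1]? := by
  have hlen : ((xs.drop j).take m).length = m := by simp; omega
  rw [List.getLast?_eq_getElem?, hlen]
  rw [List.getElem?_take_of_lt (by omega), List.getElem?_drop]
  rw [show j + (m - 1) = j + m - 1 by omega]

lemma pvSeg_dropLast (xs : List (Option Int)) (j m : Nat) (h2 : j + m ≤ xs.length) :
    ((xs.drop j).take m).dropLast = (xs.drop j).take (m - 1) := by
  have hlen : ((xs.drop j).take m).length = m := by simp; omega
  rw [List.dropLast_eq_take, hlen, List.take_take]
  congr 1; omega

-- A's loop on indices computes pvGA of the remaining segment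
lemma pvLoopA_eq (disk : List (Option Int)) :
    ∀ k l (res : List Int), l + k ≤ disk.length →
      pvLoopA disk (l : Int) ((l : Int) + (k : Int) - 1) res
        = res ++ pvGA ((disk.drop l).take k) := by
  intro k
  induction k using Nat.strong_induction_on with
  | _ k ih =>
  intro l res hlen
  rcases Nat.eq_zero_or_pos k with rfl | hk
  · rw [pvLoopA, if_neg (by omega)]; simp [pvGA]
  · rw [pvLoopA, if_pos (by omega)]
    have hj : l < disk.length := by omega
    obtain ⟨y, hy⟩ : ∃ y, disk[l]? = some y := ⟨_, List.getElem?_eq_getElem hj⟩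
    have hyy : disk[l]'hj = y := by
      rw [List.getElem?_eq_getElem hj] at hy; exact Option.some.inj hy
    rw [PySem.List.pyGetD_natCast, List.getD_eq_getElem?_getD, hy, Option.getD_some]
    rw [pvSeg_cons disk l k hj hk, hyy]
    cases y with
    | some v =>
      dsimp only
      have hrec := ih (k - 1) (by omega) (l + 1) (res ++ [v]) (by omega)
      rw [show ((l : Int) + 1) = ((l + 1 : Nat) : Int) by omega,
        show (l : Int) + (k : Int) - 1 = ((l + 1 : Nat) : Int) + ((k - 1 : Nat) : Int) - 1 by omega]
      rw [hrec, pvGA_cons_some]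
      simp
    | none =>
      dsimp only
      have hr : l + k - 1 < disk.length := by omega
      obtain ⟨z, hz⟩ : ∃ z, disk[l + k - 1]? = some z := ⟨_, List.getElem?_eq_getElem hr⟩
      rw [show (l : Int) + (k : Int) - 1 = ((l + k - 1 : Nat) : Int) by omega,
        PySem.List.pyGetD_natCast, List.getD_eq_getElem?_getD, hz, Option.getD_some]
      rcases Nat.lt_or_ge 1 k with hk2 | hk1
      · have hlast : ((disk.drop (l + 1)).take (k - 1)).getLast? = disk[l + k - 1]? := by
          rw [pvSeg_getLast? disk (l + 1) (k - 1) (by omega) (by omega),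
            show l + 1 + (k - 1) - 1 = l + k - 1 by omega]
        rw [hz] at hlast
        cases z with
        | some w =>
          dsimp only
          have hrec := ih (k - 2) (by omega) (l + 1) (res ++ [w]) (by omega)
          rw [show ((l : Int) + 1) = ((l + 1 : Nat) : Int) by omega,
            show ((l + k - 1 : Nat) : Int) - 1 = ((l + 1 : Nat) : Int) + ((k - 2 : Nat) : Int) - 1 by omega]
          rw [hrec, pvGA_cons_none_some _ w hlast,
            pvSeg_dropLast disk (l + 1) (k - 1) (by omega),
            show k - 1 - 1 = k - 2 by omega]
          simp
        | none =>
          dsimp only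
          have hrec := ih (k - 1) (by omega) l res (by omega)
          rw [show ((l + k - 1 : Nat) : Int) - 1 = (l : Int) + ((k - 1 : Nat) : Int) - 1 by omega]
          rw [hrec, pvGA_cons_none_none _ hlast,
            pvSeg_dropLast disk (l + 1) (k - 1) (by omega),
            show k - 1 - 1 = k - 2 by omega]
          congr 1
          rw [pvSeg_cons disk l (k - 1) hj (by omega), hyy,
            show k - 1 - 1 = k - 2 by omega]
      · have hk1' : k = 1 := by omega
        subst hk1'
        have hzz : z = none := by
          rw [show l + 1 - 1 = l by omega, hy] at hz
          exact (Option.some.inj hz).symm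
        subst hzz
        dsimp only
        have hrec := ih 0 (by omega) l res (by omega)
        rw [show ((l + 1 - 1 : Nat) : Int) - 1 = (l : Int) + ((0 : Nat) : Int) - 1 by omega]
        rw [hrec]
        have hnil : pvGA [] = [] := by rw [pvGA]
        simp [pvGA_singleton_none, hnil]

-- ===== B-side lemmas =====

lemma pvGaps_length (u : List (Option Int)) : ∀ i, (pvGaps u i).length = u.countP (fun o => o.isNone) := by
  induction u with
  | nil => intro i; simp [pvGaps]
  | cons x t ih =>
    intro i
    cases x <;> simp [pvGaps, ih]

lemma pvGaps_shift (u : List (Option Int)) : ∀ i, pvGaps u (i + 1) = (pvGaps u i).map (· + 1) := by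
  induction u with
  | nil => intro i; simp [pvGaps]
  | cons x t ih =>
    intro i
    cases x <;> simp [pvGaps, ih (i + 1)]

lemma pvScatter_cons (g : List Nat) : ∀ (rt : List Int) (x : Int) (out : List Int),
    ((g.map (· + 1)).zip rt).foldl (fun o p => o.set p.1 p.2) (x :: out)
      = x :: (g.zip rt).foldl (fun o p => o.set p.1 p.2) out := by
  induction g with
  | nil => intro rt x out; simp
  | cons i t ih =>
    intro rt x out
    cases rt with
    | nil => simp
    | cons r rs =>
      simp only [List.map_cons, List.zip_cons_cons, List.foldl_cons, List.set]
      exact ih rs x (out.set i r)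

lemma pvScatter_spec (u : List (Option Int)) : ∀ (rt : List Int),
    rt.length = u.countP (fun o => o.isNone) →
    ((pvGaps u 0).zip rt).foldl (fun o p => o.set p.1 p.2)
        (u.map (fun x => match x with | some v => v | none => 0))
      = pvFill u rt := by
  induction u with
  | nil => intro rt _; simp [pvGaps, pvFill]
  | cons x t ih =>
    intro rt hlen
    cases x with
    | some v =>
      simp only [List.countP_cons, Option.isNone_some] at hlen
      simp only [pvGaps, pvFill, List.map_cons]
      rw [pvGaps_shift t 0, pvScatter_cons, ih rt (by simpa using hlen)]
    | none =>
      rw [List.countP_cons] at hlen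
      simp only [Option.isNone_none, if_pos] at hlen
      cases rt with
      | nil => simp at hlen
      | cons r rs =>
        simp only [pvGaps, pvFill, List.map_cons, List.zip_cons_cons, List.foldl_cons, List.set]
        rw [pvGaps_shift t 0, pvScatter_cons, ih rs (by simp at hlen ⊢; omega)]

lemma pvFill_length_eq (u : List (Option Int)) : ∀ (B : List Int),
    u.countP (fun o => o.isNone) ≤ B.length → (pvFill u B).length = u.length := by
  induction u with
  | nil => intro B _; simp [pvFill]
  | cons x t ih =>
    intro B h
    cases x with
    | some v =>
      rw [List.countP_cons] at h
      simp only [pvFill, List.length_cons]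
      rw [ih B (by simp at h ⊢; omega)]
    | none =>
      rw [List.countP_cons] at h
      simp only [Option.isNone_none] at h
      cases B with
      | nil => simp at h
      | cons b bs =>
        simp only [pvFill, List.length_cons]
        rw [ih bs (by simp at h ⊢; omega)]

lemma pvFill_take_back (u : List (Option Int)) : ∀ (B : List Int),
    pvFill u B = pvFill u (B.take (u.countP (fun o => o.isNone))) := by
  induction u with
  | nil => intro B; simp [pvFill]
  | cons x t ih =>
    intro B
    cases x with
    | some v =>
      simp only [pvFill, List.countP_cons, Option.isNone_some]
      rw [ih B]; simp
    | none =>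
      cases B with
      | nil => simp [pvFill]
      | cons b bs =>
        simp only [pvFill, List.countP_cons, Option.isNone_none, if_pos]
        rw [List.take_succ_cons]
        simp only [pvFill]
        exact congrArg _ (ih bs)

lemma pvTake_fill_prefix (head rest : List (Option Int)) (B : List Int)
    (h : head.countP (fun o => o.isNone) ≤ B.length) :
    (pvFill (head ++ rest) B).take head.length = pvFill head B := by
  have hl := pvFill_length_eq head B h
  rw [pvTake_of_prefix head.length (pvFill_prefix_append head rest B) (le_of_eq hl.symm)]
  rw [← hl, List.take_length]

lemma pvRev_take (l : List Int) (k : Nat) (hk : k ≤ l.length) :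
    l.reverse.take k = (l.drop (l.length - k)).reverse := by
  conv_lhs => rw [← List.take_append_drop (l.length - k) l]
  rw [List.reverse_append, List.take_append_of_le_length (by simp; omega)]
  rw [List.take_of_length_le (by simp; omega)]

theorem compact_filesystem_spec : Claim_equal_compact_filesystem := by
  intro disk _
  unfold Spec_compact_filesystem compact_filesystem compact_filesystem_alt
  -- A side: the loop equals pvGA, which equals the fill closed form
  have hA := pvLoopA_eq disk disk.length 0 [] (by omega)
  rw [PySem.List.len_eq,
    show ((disk.length : Int) - 1) = ((0 : Nat) : Int) + ((disk.length : Nat) : Int) - 1 by omega,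
    show (0 : Int) = ((0 : Nat) : Int) by omega]
  rw [hA]
  simp only [List.drop_zero, List.take_length, List.nil_append]
  rw [pvGA_spec]
  -- B side
  simp only [show (disk.filterMap id) = disk.reduceOption from rfl]
  set red := disk.reduceOption with hred
  set n := red.length with hn
  set head := disk.take n with hhead
  have hnle : n ≤ disk.length := List.reduceOption_length_le disk
  have hheadlen : head.length = n := by simp [hhead]; omega
  set k := head.countP (fun o => o.isNone) with hkdef
  have hkle : k ≤ n := by
    have := List.countP_le_length (p := fun o => o.isNone) (l := head)
    omega
  have hgl : (pvGaps head 0).length = k := pvGaps_length head 0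
  rw [hgl]
  have hmovlen : (red.drop (n - k)).length = k := by simp; omega
  simp only [Nat.cast_zero]
  rw [pvScatter_spec head (red.drop (n - k)).reverse (by simpa using hmovlen)]
  -- close the gap between the two fill expressions
  have hTF := pvTake_fill_prefix head (disk.drop n) red.reverse (by simp; omega)
  rw [hheadlen] at hTF
  rw [show List.take n (pvFill disk red.reverse)
        = List.take n (pvFill (head ++ disk.drop n) red.reverse) from by
      rw [hhead, List.take_append_drop]]
  rw [hTF, pvFill_take_back head red.reverse, ← hkdef, pvRev_take red k hkle]
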